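-- pv_equiv track=rewrite | github.com/Matsuda1998/self_taught | leetcode_item5.py | sum_limit
-- ===== SOURCE A (Python) =====
-- from typing import List
--
-- def sum_limit(num_list:List[int],limit:int)->int:
--     num_sublist=[]
--     for val in num_list:
--         num_sublist.append([0,val])
--
--     chk_list=num_sublist[0]
--     for i in range(1,len(num_sublist)):
--         temp_list=[]
--         for j in range(len(chk_list)):
--             for k in range(2):
--                 n=chk_list[j]+num_sublist[i][k]
--                 temp_list.append(n)
--         chk_list=temp_list
--     if limit in chk_list:
--         return limit
--     else:
--         chk_list2=[]
--         for val in chk_list: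
--             if val < limit :
--                 chk_list2.append(val)
--         chk_list2.sort(reverse=1)
--         return chk_list2[0]
-- ===== SOURCE B (Python) =====
-- from typing import List
--
-- def sum_limit(num_list: List[int], limit: int) -> int:
--     # Recursive include/exclude search: returns the best subset sum <= limit
--     # directly (None if no subset sum fits), never materialising any
--     # collection of sums.
--     def go(items, cur):
--         if not items:
--             return cur if cur <= limit else None
--         a = go(items[1:], cur)
--         b = go(items[1:], cur + items[0])
--         if a is None:
--             return b
--         if b is None:
--             return a
--         return max(a, b)
--     return go(num_list, 0)
-- ===== Notes on version B (the rewrite author's own statement) =====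
-- stated objective: simpler
-- what changed: A materialises all 2^n subset sums in an explicitly grown list, tests membership of limit, then filters and reverse-sorts to take the head; B is a short recursive include/exclude search that carries only the running sum and combines the two branch results with max, returning the best sum <= limit directly without ever building a collection of sums.
import Mathlib
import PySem

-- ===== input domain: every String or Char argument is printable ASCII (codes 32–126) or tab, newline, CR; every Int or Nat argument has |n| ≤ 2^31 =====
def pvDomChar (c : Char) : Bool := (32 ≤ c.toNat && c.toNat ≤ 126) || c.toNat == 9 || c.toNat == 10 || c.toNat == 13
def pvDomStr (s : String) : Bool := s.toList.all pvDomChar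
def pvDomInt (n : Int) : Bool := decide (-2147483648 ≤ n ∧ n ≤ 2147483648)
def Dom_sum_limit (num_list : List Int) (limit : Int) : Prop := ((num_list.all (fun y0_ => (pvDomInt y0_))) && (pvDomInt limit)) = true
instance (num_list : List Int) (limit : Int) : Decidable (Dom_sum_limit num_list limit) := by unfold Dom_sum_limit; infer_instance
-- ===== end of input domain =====

-- B replaces A's materialisation of all 2^n subset sums (list growth, membership test,
-- filter, reverse sort) by a recursive include/exclude search that carries only the
-- running sum and returns the best subset sum ≤ limit directly as an Option.

-- ===== PORT A =====
def sum_limit (num_list : List Int) (limit : Int) : Int :=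
  let num_sublist : List (List Int) := num_list.foldl (fun acc val => acc ++ [[0, val]]) []
  let chk_list0 : List Int := (PySem.List.pyGet? num_sublist 0).getD []
  let chk_list : List Int :=
    (PySem.List.pyRange 1 (num_sublist.length : Int) 1).foldl
      (fun chk_list i =>
        (PySem.List.pyRange 0 (chk_list.length : Int) 1).foldl
          (fun temp_list j =>
            (PySem.List.pyRange 0 2 1).foldl
              (fun temp_list k =>
                temp_list ++ [PySem.List.pyGetD chk_list j 0 +
                  PySem.List.pyGetD (PySem.List.pyGetD num_sublist i []) k 0])
              temp_list)
          [])
      chk_list0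
  if limit ∈ chk_list then limit
  else
    let chk_list2 : List Int :=
      chk_list.foldl (fun acc val => if val < limit then acc ++ [val] else acc) []
    let chk_list2 := PySem.List.sorted chk_list2 (fun x => x) true
    (PySem.List.pyGet? chk_list2 0).getD 0   -- chk_list2[0]; the IndexError case (none) is excluded by Pre_

-- ===== PORT B =====
-- go(items, cur): none ↔ Python's None (no subset sum of items, offset by cur, is ≤ limit)
def goAlt (limit : Int) : List Int → Int → Option Int
  | [], cur => if cur ≤ limit then some cur else none
  | v :: tl, cur =>
    let a := goAlt limit tl cur
    let b := goAlt limit tl (cur + v)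
    match a, b with
    | none, b => b
    | some x, none => some x
    | some x, some y => some (max x y)

def sum_limit_alt (num_list : List Int) (limit : Int) : Int :=
  (goAlt limit num_list 0).getD 0   -- the None case (Python B returns no int) is excluded by Pre_

-- ===== PRECONDITION & SPEC =====
-- Pre_ is exactly where Python A returns normally: a nonempty list whose minimal subset sum
-- (the sum of its negative elements) is ≤ limit; on every other input A raises IndexError.
def Pre_sum_limit (num_list : List Int) (limit : Int) : Prop :=
  num_list ≠ [] ∧ (num_list.filter (fun x => decide (x < 0))).sum ≤ limit
instance (num_list : List Int) (limit : Int) : Decidable (Pre_sum_limit num_list limit) := by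
  unfold Pre_sum_limit; infer_instance
def pvWitness_sum_limit : List Int × Int := ([1, 2], 2)

def Spec_sum_limit (num_list : List Int) (limit : Int) (out : Int) : Prop := out = sum_limit_alt num_list limit
instance (num_list : List Int) (limit : Int) (out : Int) : Decidable (Spec_sum_limit num_list limit out) := by unfold Spec_sum_limit; infer_instance

-- ===== CLAIM (what is proved, stated in full; the proofs are below) =====
def Claim_equal_sum_limit : Prop := ∀ (num_list : List Int) (limit : Int), Dom_sum_limit num_list limit → Pre_sum_limit num_list limit → Spec_sum_limit num_list limit (sum_limit num_list limit)

-- ===== LEMMAS AND PROOFS =====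

-- the list of all subset sums of l, offset by cur (proof-only reference object)
def pvSL : List Int → Int → List Int
  | [], cur => [cur]
  | v :: tl, cur => pvSL tl cur ++ pvSL tl (cur + v)

-- A's per-element step, once its index loops are unfolded
def pvStepA (chk : List Int) (v : Int) : List Int :=
  chk.flatMap (fun c => [c + 0, c + v])

lemma mem_stepA {chk : List Int} {v x : Int} :
    x ∈ pvStepA chk v ↔ x ∈ chk ∨ ∃ c ∈ chk, x = c + v := by
  simp only [pvStepA, List.mem_flatMap, List.mem_cons, List.not_mem_nil, or_false, add_zero]
  constructor
  · rintro ⟨c, hc, hx | hx⟩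
    · exact Or.inl (hx ▸ hc)
    · exact Or.inr ⟨c, hc, hx⟩
  · rintro (hx | ⟨c, hc, hx⟩)
    · exact ⟨x, hx, Or.inl rfl⟩
    · exact ⟨c, hc, Or.inr hx⟩

-- membership in A's fold, related to subset sums from each seed
lemma mem_fold_A_SL (l : List Int) (chk : List Int) (x : Int) :
    x ∈ l.foldl pvStepA chk ↔ ∃ c ∈ chk, x ∈ pvSL l c := by
  induction l generalizing chk with
  | nil => simp [pvSL]
  | cons v tl ih =>
    rw [List.foldl_cons, ih]
    constructor
    · rintro ⟨c, hc, hx⟩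
      rcases mem_stepA.1 hc with hc' | ⟨c0, hc0, rfl⟩
      · exact ⟨c, hc', by simp [pvSL, hx]⟩
      · exact ⟨c0, hc0, by simp [pvSL, hx]⟩
    · rintro ⟨c, hc, hx⟩
      rcases (by simpa [pvSL] using hx : x ∈ pvSL tl c ∨ x ∈ pvSL tl (c + v)) with h | h
      · exact ⟨c, mem_stepA.2 (Or.inl hc), h⟩
      · exact ⟨c + v, mem_stepA.2 (Or.inr ⟨c, hc, rfl⟩), h⟩

-- the sum of the negative elements is always one of the subset sums
lemma negsum_mem_SL (l : List Int) (cur : Int) :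
    cur + (l.filter (fun x => decide (x < 0))).sum ∈ pvSL l cur := by
  induction l generalizing cur with
  | nil => simp [pvSL]
  | cons v tl ih =>
    by_cases hv : v < 0
    · have he : cur + ((v :: tl).filter (fun x => decide (x < 0))).sum
          = (cur + v) + (tl.filter (fun x => decide (x < 0))).sum := by
        simp [hv]; ring
      rw [he]
      exact List.mem_append_right _ (ih (cur + v))
    · have h := List.mem_append_left (pvSL tl (cur + v)) (ih cur)
      simpa [pvSL, List.filter_cons, hv] using h

-- goAlt is exactly "the greatest element of pvSL l cur that is ≤ limit, if any"
lemma goAlt_none (limit : Int) (l : List Int) (cur : Int) :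
    goAlt limit l cur = none → ∀ x ∈ pvSL l cur, limit < x := by
  induction l generalizing cur with
  | nil =>
    intro h x hx
    simp only [pvSL, List.mem_singleton] at hx
    subst hx
    by_contra hle
    simp [goAlt, not_lt.1 hle] at h
  | cons v tl ih =>
    intro h x hx
    simp only [goAlt] at h
    rcases ha : goAlt limit tl cur with _ | a <;> rcases hb : goAlt limit tl (cur + v) with _ | b <;>
      simp [ha, hb] at h
    rcases (by simpa [pvSL] using hx : x ∈ pvSL tl cur ∨ x ∈ pvSL tl (cur + v)) with hx' | hx'
    · exact ih cur ha x hx'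
    · exact ih (cur + v) hb x hx'

lemma goAlt_some (limit : Int) (l : List Int) (cur m : Int) :
    goAlt limit l cur = some m →
      m ∈ pvSL l cur ∧ m ≤ limit ∧ ∀ x ∈ pvSL l cur, x ≤ limit → x ≤ m := by
  induction l generalizing cur m with
  | nil =>
    intro h
    by_cases hle : cur ≤ limit
    · simp only [goAlt, if_pos hle, Option.some.injEq] at h
      subst h
      exact ⟨by simp [pvSL], hle, by simp [pvSL]⟩
    · simp [goAlt, hle] at h
  | cons v tl ih =>
    intro h
    simp only [goAlt] at h
    have hmem : ∀ x, (x ∈ pvSL tl cur ∨ x ∈ pvSL tl (cur + v)) ↔ x ∈ pvSL (v :: tl) cur := by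
      intro x; simp [pvSL]
    rcases ha : goAlt limit tl cur with _ | a <;> rcases hb : goAlt limit tl (cur + v) with _ | b <;>
      simp only [ha, hb] at h
    case none.none => exact absurd h (by simp)
    case none.some =>
      obtain rfl : b = m := by simpa using h
      obtain ⟨h1, h2, h3⟩ := ih (cur + v) b hb
      refine ⟨(hmem b).1 (Or.inr h1), h2, ?_⟩
      intro x hx hxle
      rcases (by simpa [pvSL] using hx : x ∈ pvSL tl cur ∨ x ∈ pvSL tl (cur + v)) with hx' | hx'
      · exact absurd hxle (not_le.2 (goAlt_none limit tl cur ha x hx'))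
      · exact h3 x hx' hxle
    case some.none =>
      obtain rfl : a = m := by simpa using h
      obtain ⟨h1, h2, h3⟩ := ih cur a ha
      refine ⟨(hmem a).1 (Or.inl h1), h2, ?_⟩
      intro x hx hxle
      rcases (by simpa [pvSL] using hx : x ∈ pvSL tl cur ∨ x ∈ pvSL tl (cur + v)) with hx' | hx'
      · exact h3 x hx' hxle
      · exact absurd hxle (not_le.2 (goAlt_none limit tl (cur + v) hb x hx'))
    case some.some =>
      obtain rfl : max a b = m := by simpa using h
      obtain ⟨ha1, ha2, ha3⟩ := ih cur a ha
      obtain ⟨hb1, hb2, hb3⟩ := ih (cur + v) b hb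
      constructor
      · rcases max_choice a b with hc | hc <;> rw [hc]
        · exact (hmem a).1 (Or.inl ha1)
        · exact (hmem b).1 (Or.inr hb1)
      refine ⟨max_le ha2 hb2, ?_⟩
      intro x hx hxle
      rcases (by simpa [pvSL] using hx : x ∈ pvSL tl cur ∨ x ∈ pvSL tl (cur + v)) with hx' | hx'
      · exact le_max_of_le_left (ha3 x hx' hxle)
      · exact le_max_of_le_right (hb3 x hx' hxle)

-- A's chk_list, rewritten as a fold of pvStepA over the tail of the input
lemma chkA_eq (v0 : Int) (tl : List Int) :
    (PySem.List.pyRange 1 ((((v0 :: tl).foldl (fun acc val => acc ++ [[0, val]]) []).length : Int)) 1).foldl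
      (fun chk_list i =>
        (PySem.List.pyRange 0 ((chk_list.length : Int)) 1).foldl
          (fun temp_list j =>
            (PySem.List.pyRange 0 2 1).foldl
              (fun temp_list k =>
                temp_list ++ [PySem.List.pyGetD chk_list j 0 +
                  PySem.List.pyGetD (PySem.List.pyGetD ((v0 :: tl).foldl (fun acc val => acc ++ [[0, val]]) []) i []) k 0])
              temp_list)
          [])
      ((PySem.List.pyGet? ((v0 :: tl).foldl (fun acc val => acc ++ [[0, val]]) []) 0).getD [])
    = tl.foldl pvStepA [0, v0] := by
  have hmap : (v0 :: tl).foldl (fun acc val => acc ++ [[0, val]]) ([] : List (List Int))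
      = (v0 :: tl).map (fun v => [0, v]) := by
    simpa using PySem.List.foldl_append_singleton_eq_map
      (f := fun v => ([0, v] : List Int)) (l := v0 :: tl) (acc := [])
  rw [hmap]
  rw [PySem.List.foldl_pyRange_pyGetD' ((v0 :: tl).map (fun v => [0, v])) []
      (fun chk_list row =>
        (PySem.List.pyRange 0 ((chk_list.length : Int)) 1).foldl
          (fun temp_list j =>
            (PySem.List.pyRange 0 2 1).foldl
              (fun temp_list k =>
                temp_list ++ [PySem.List.pyGetD chk_list j 0 + PySem.List.pyGetD row k 0])
              temp_list)
          [])
      ((PySem.List.pyGet? ((v0 :: tl).map (fun v => [0, v])) 0).getD []) (by norm_num)]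
  have hdrop : (((v0 :: tl).map (fun v => ([0, v] : List Int))).drop (1 : Int).toNat)
      = tl.map (fun v => [0, v]) := by simp
  have hinit : ((PySem.List.pyGet? ((v0 :: tl).map (fun v => ([0, v] : List Int))) 0).getD [])
      = [0, v0] := by simp [PySem.List.pyGet?, PySem.List.pyIdx?]
  rw [hdrop, hinit, List.foldl_map]
  refine PySem.List.foldl_congr_mem tl _ _ _ (fun chk v _ => ?_)
  have hrow0 : PySem.List.pyGetD ([0, v] : List Int) 0 0 = 0 := by
    simp [PySem.List.pyGetD]
  have hrow1 : PySem.List.pyGetD ([0, v] : List Int) 1 0 = v := by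
    simp [PySem.List.pyGetD]
  have hk : ∀ (temp : List Int) (c : Int),
      (PySem.List.pyRange 0 2 1).foldl
        (fun t k => t ++ [c + PySem.List.pyGetD ([0, v] : List Int) k 0]) temp
      = temp ++ [c + 0, c + v] := by
    intro temp c
    have h2 : PySem.List.pyRange 0 2 1 = [0, 1] := by decide
    simp [h2, hrow0, hrow1]
  calc (PySem.List.pyRange 0 ((chk.length : Int)) 1).foldl
        (fun temp_list j =>
          (PySem.List.pyRange 0 2 1).foldl
            (fun t k => t ++ [PySem.List.pyGetD chk j 0 + PySem.List.pyGetD ([0, v] : List Int) k 0]) temp_list)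
        []
      = chk.foldl (fun temp c => temp ++ [c + 0, c + v]) [] := by
        rw [PySem.List.foldl_pyRange_zero_pyGetD' chk 0
          (fun temp c => (PySem.List.pyRange 0 2 1).foldl
            (fun t k => t ++ [c + PySem.List.pyGetD ([0, v] : List Int) k 0]) temp) []]
        exact PySem.List.foldl_congr_mem chk _ _ [] (fun temp c _ => hk temp c)
    _ = pvStepA chk v := by
        simpa [pvStepA] using
          PySem.List.foldl_append_eq_flatMap (g := fun c => ([c + 0, c + v] : List Int)) (l := chk) (acc := [])

-- the final comparison, abstracted over A's sum list and B's option result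
lemma result_eq (chkA S : List Int) (limit negsum : Int) (o : Option Int)
    (hmem : ∀ x, x ∈ chkA ↔ x ∈ S)
    (hsome : ∀ m, o = some m → m ∈ S ∧ m ≤ limit ∧ ∀ x ∈ S, x ≤ limit → x ≤ m)
    (hnone : o = none → ∀ x ∈ S, limit < x)
    (hw : negsum ∈ S) (hneg : negsum ≤ limit) :
    (if limit ∈ chkA then limit
     else (PySem.List.pyGet? (PySem.List.sorted
        (chkA.foldl (fun acc val => if val < limit then acc ++ [val] else acc) [])
        (fun x => x) true) 0).getD 0)
    = o.getD 0 := by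
  rcases ho : o with _ | m
  · exact absurd hneg (not_le.2 (hnone ho negsum hw))
  obtain ⟨hmS, hmle, hmmax⟩ := hsome m ho
  by_cases h : limit ∈ chkA
  · rw [if_pos h]
    have : limit ≤ m := hmmax limit ((hmem limit).1 h) le_rfl
    simp [le_antisymm hmle this]
  · rw [if_neg h]
    have hlimS : limit ∉ S := fun hc => h ((hmem limit).2 hc)
    rw [PySem.List.foldl_append_ite_eq_filter, List.nil_append]
    set FA := chkA.filter (fun x => decide (x < limit)) with hFA
    have hmFA : m ∈ FA := by
      have hmlt : m < limit := lt_of_le_of_ne hmle (fun he => hlimS (he ▸ hmS))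
      simp only [hFA, List.mem_filter, decide_eq_true_eq]
      exact ⟨(hmem m).2 hmS, hmlt⟩
    cases hs : PySem.List.sorted FA (fun x => x) true with
    | nil =>
      rw [PySem.List.sorted_eq_nil_iff] at hs
      simp [hs] at hmFA
    | cons hd t =>
      have hhdFA : hd ∈ FA :=
        (PySem.List.sorted_perm FA (fun x => x) true).mem_iff.1 (by rw [hs]; exact List.mem_cons_self)
      obtain ⟨hhdchk, hhdlt⟩ : hd ∈ chkA ∧ hd < limit := by
        simpa [hFA, List.mem_filter] using hhdFA
      have h1 : m ≤ hd := PySem.List.key_head_sorted_rev_ge FA (fun x => x) hs m hmFA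
      have h2 : hd ≤ m := hmmax hd ((hmem hd).1 hhdchk) (le_of_lt hhdlt)
      simp [le_antisymm h2 h1, PySem.List.pyGet?, PySem.List.pyIdx?]

theorem sum_limit_spec : Claim_equal_sum_limit := by
  intro num_list limit _ hpre
  obtain ⟨hne, hneg⟩ := hpre
  obtain ⟨v0, tl, rfl⟩ := List.exists_cons_of_ne_nil hne
  unfold Spec_sum_limit sum_limit sum_limit_alt
  dsimp only
  rw [chkA_eq v0 tl]
  have hmem : ∀ x, x ∈ tl.foldl pvStepA [0, v0] ↔ x ∈ pvSL (v0 :: tl) 0 := by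
    intro x
    rw [mem_fold_A_SL]
    constructor
    · rintro ⟨c, hc, hx⟩
      rcases (by simpa using hc : c = 0 ∨ c = v0) with rfl | rfl
      · simp [pvSL, hx]
      · simpa [pvSL] using Or.inr (by simpa using hx)
    · intro hx
      rcases (by simpa [pvSL] using hx : x ∈ pvSL tl 0 ∨ x ∈ pvSL tl v0) with h | h
      · exact ⟨0, by simp, h⟩
      · exact ⟨v0, by simp, h⟩
  have hw : ((v0 :: tl).filter (fun x => decide (x < 0))).sum ∈ pvSL (v0 :: tl) 0 := by
    simpa using negsum_mem_SL (v0 :: tl) 0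
  exact result_eq _ _ limit _ (goAlt limit (v0 :: tl) 0) hmem
    (goAlt_some limit (v0 :: tl) 0) (goAlt_none limit (v0 :: tl) 0) hw hneg
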